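-- pv_equiv track=rewrite | github.com/josola/project-euler | python/p017.py | compute
-- ===== SOURCE A (Python) =====
-- def compute(START, END):
--
-- 	ones_place = [ "", "one", "two", "three", "four", "five", "six", "seven", "eight", "nine", "ten", "eleven", "twelve", "thirteen", "forteen", "fifteen", "sixteen", "seventeen", "eighteen", "nineteen" ]
-- 	tens_place = [ "", "", "twenty", "thirty", "forty", "fifty", "sixty", "seventy", "eighty", "ninety" ]
-- 	hundreds_place = "hundred"
--
-- 	total = 0
-- 	for i in range(START, END + 1, 1):
--
-- 		word = ""
--
-- 		if i < 20:
-- 			word = ones_place[i]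
-- 		elif i >= 20 and i < 100:
-- 			word = tens_place[i // 10] + ones_place[i % 10]
-- 		elif i >= 100 and (i % 100) // 10 == 0 and i % 10 == 0 and i < 1000:
-- 			word = ones_place[i // 100] + hundreds_place
-- 		elif i >= 100 and (i % 100) // 10 < 2 and i < 1000:
-- 			word = ones_place[i // 100] + hundreds_place + "and" + ones_place[i % 100]
-- 		elif i >= 120 and i < 1000:
-- 			word = ones_place[i // 100] + hundreds_place + "and" + tens_place[(i % 100) // 10] + ones_place[i % 10]
-- 		elif i == 1000:
-- 			word = "onethousand"
--
-- 		total += len(word)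
--
-- 	return total
-- ===== SOURCE B (Python) =====
-- def compute(START, END):
--     ones_len = [0, 3, 3, 5, 4, 4, 3, 5, 5, 4, 3, 6, 6, 8, 7, 7, 7, 9, 8, 8]
--     tens_len = [0, 0, 6, 6, 5, 5, 5, 7, 6, 6]
--
--     def letters(n):
--         if n < 20:
--             return ones_len[n]
--         if n < 100:
--             return tens_len[n // 10] + ones_len[n % 10]
--         if n < 1000:
--             r = n % 100
--             return ones_len[n // 100] + 7 + (3 + letters(r) if r else 0)
--         return 11 if n == 1000 else 0
--
--     return sum(letters(i) for i in range(START, END + 1))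
-- ===== Notes on version B (the rewrite author's own statement) =====
-- stated objective: alternative
-- what changed: B replaces A's six-branch flat elif chain that concatenates word strings and measures them with a recursive place-value helper that computes each number's letter count directly from integer length tables, so no strings are built at all.
import Mathlib
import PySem

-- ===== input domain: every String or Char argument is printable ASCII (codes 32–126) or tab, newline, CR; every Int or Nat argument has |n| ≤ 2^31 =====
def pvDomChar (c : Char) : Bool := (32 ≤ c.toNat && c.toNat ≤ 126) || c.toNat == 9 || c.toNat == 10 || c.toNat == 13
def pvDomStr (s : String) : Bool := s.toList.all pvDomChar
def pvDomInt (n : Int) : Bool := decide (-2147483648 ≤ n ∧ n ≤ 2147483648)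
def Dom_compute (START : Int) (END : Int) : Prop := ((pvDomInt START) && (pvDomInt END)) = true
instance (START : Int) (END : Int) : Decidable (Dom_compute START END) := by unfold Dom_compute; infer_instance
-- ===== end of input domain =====

-- B replaces A's six-branch string-building chain by a recursive letter-COUNT helper over
-- place value (pure integer arithmetic from length tables, no string concatenation): alternative decomposition.

-- ===== PORT A =====
def pvOnesA : List String :=
  ["", "one", "two", "three", "four", "five", "six", "seven", "eight", "nine", "ten",
   "eleven", "twelve", "thirteen", "forteen", "fifteen", "sixteen", "seventeen", "eighteen", "nineteen"]
def pvTensA : List String :=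
  ["", "", "twenty", "thirty", "forty", "fifty", "sixty", "seventy", "eighty", "ninety"]

-- negative i wraps from the end, exactly as Python's ones_place[i]; out-of-range (IndexError) is excluded by Pre_
def pvWordA (i : Int) : String :=
  if i < 20 then (PySem.List.pyGet? pvOnesA i).getD ""
  else if 20 ≤ i ∧ i < 100 then
    (PySem.List.pyGet? pvTensA (PySem.Int.floordiv i 10)).getD "" ++
      (PySem.List.pyGet? pvOnesA (PySem.Int.mod i 10)).getD ""
  else if 100 ≤ i ∧ PySem.Int.floordiv (PySem.Int.mod i 100) 10 = 0 ∧ PySem.Int.mod i 10 = 0 ∧ i < 1000 then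
    (PySem.List.pyGet? pvOnesA (PySem.Int.floordiv i 100)).getD "" ++ "hundred"
  else if 100 ≤ i ∧ PySem.Int.floordiv (PySem.Int.mod i 100) 10 < 2 ∧ i < 1000 then
    (PySem.List.pyGet? pvOnesA (PySem.Int.floordiv i 100)).getD "" ++ "hundred" ++ "and" ++
      (PySem.List.pyGet? pvOnesA (PySem.Int.mod i 100)).getD ""
  else if 120 ≤ i ∧ i < 1000 then
    (PySem.List.pyGet? pvOnesA (PySem.Int.floordiv i 100)).getD "" ++ "hundred" ++ "and" ++
      (PySem.List.pyGet? pvTensA (PySem.Int.floordiv (PySem.Int.mod i 100) 10)).getD "" ++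
      (PySem.List.pyGet? pvOnesA (PySem.Int.mod i 10)).getD ""
  else if i = 1000 then "onethousand"
  else ""

def compute (START : Int) (END : Int) : Int :=
  (PySem.List.pyRange START (END + 1) 1).foldl (fun total i => total + PySem.Str.len (pvWordA i)) 0

-- ===== PORT B =====
def pvOnesLen : List Int := [0, 3, 3, 5, 4, 4, 3, 5, 5, 4, 3, 6, 6, 8, 7, 7, 7, 9, 8, 8]
def pvTensLen : List Int := [0, 0, 6, 6, 5, 5, 5, 7, 6, 6]

-- negative n wraps from the end, exactly as Python's ones_len[n]
def pvLetters (n : Int) : Int :=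
  if n < 20 then (PySem.List.pyGet? pvOnesLen n).getD 0
  else if n < 100 then
    (PySem.List.pyGet? pvTensLen (PySem.Int.floordiv n 10)).getD 0 +
      (PySem.List.pyGet? pvOnesLen (PySem.Int.mod n 10)).getD 0
  else if h1000 : n < 1000 then
    let r := PySem.Int.mod n 100
    (PySem.List.pyGet? pvOnesLen (PySem.Int.floordiv n 100)).getD 0 + 7 +
      (if r ≠ 0 then 3 + pvLetters r else 0)
  else if n = 1000 then 11 else 0
termination_by n.toNat
decreasing_by
  have h1 := PySem.Int.mod_nonneg n (b := 100) (by norm_num)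
  have h2 := PySem.Int.mod_lt n (b := 100) (by norm_num)
  omega

def compute_alt (START : Int) (END : Int) : Int :=
  ((PySem.List.pyRange START (END + 1) 1).map pvLetters).sum

-- ===== PRECONDITION & SPEC =====
-- A raises IndexError (ones_place[i] with i < -20) iff the range is nonempty and starts below -20;
-- Pre_ excludes exactly those inputs.
def Pre_compute (START : Int) (END : Int) : Prop := -20 ≤ START ∨ END < START
instance (START : Int) (END : Int) : Decidable (Pre_compute START END) := by unfold Pre_compute; infer_instance
def pvWitness_compute : Int × Int := (1, 20)

def Spec_compute (START : Int) (END : Int) (out : Int) : Prop := out = compute_alt START END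
instance (START : Int) (END : Int) (out : Int) : Decidable (Spec_compute START END out) := by unfold Spec_compute; infer_instance

-- ===== CLAIM (what is proved, stated in full; the proofs are below) =====
def Claim_equal_compute : Prop := ∀ (START : Int) (END : Int), Dom_compute START END → Pre_compute START END → Spec_compute START END (compute START END)

-- ===== LEMMAS AND PROOFS =====

theorem pvLenApp (a b : String) : PySem.Str.len (a ++ b) = PySem.Str.len a + PySem.Str.len b := by
  simp [PySem.Str.len]

theorem pvLO (k : Int) (h1 : -20 ≤ k) (h2 : k < 20) :
    PySem.Str.len ((PySem.List.pyGet? pvOnesA k).getD "") = (PySem.List.pyGet? pvOnesLen k).getD 0 := by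
  interval_cases k <;> decide

theorem pvLT (k : Int) (h1 : 0 ≤ k) (h2 : k < 10) :
    PySem.Str.len ((PySem.List.pyGet? pvTensA k).getD "") = (PySem.List.pyGet? pvTensLen k).getD 0 := by
  interval_cases k <;> decide

theorem pvPointwise (i : Int) (hi : -20 ≤ i) : PySem.Str.len (pvWordA i) = pvLetters i := by
  rw [pvWordA, pvLetters]
  by_cases h20 : i < 20
  · rw [if_pos h20, if_pos h20]; exact pvLO i hi h20
  · rw [if_neg h20, if_neg h20]
    have e10d : PySem.Int.floordiv i 10 = i / 10 := PySem.Int.floordiv_eq_ediv_of_pos (by norm_num)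
    have e10m : PySem.Int.mod i 10 = i % 10 := PySem.Int.mod_eq_emod_of_pos (by norm_num)
    have e100d : PySem.Int.floordiv i 100 = i / 100 := PySem.Int.floordiv_eq_ediv_of_pos (by norm_num)
    have e100m : PySem.Int.mod i 100 = i % 100 := PySem.Int.mod_eq_emod_of_pos (by norm_num)
    have er10d : PySem.Int.floordiv (PySem.Int.mod i 100) 10 = (i % 100) / 10 := by
      rw [e100m]; exact PySem.Int.floordiv_eq_ediv_of_pos (by norm_num)
    by_cases h100 : i < 100
    · rw [if_pos ⟨by omega, h100⟩, if_pos h100, pvLenApp,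
        pvLT _ (by rw [e10d]; omega) (by rw [e10d]; omega),
        pvLO _ (by rw [e10m]; omega) (by rw [e10m]; omega)]
    · rw [if_neg (by omega), if_neg h100]
      by_cases h1000 : i < 1000
      · rw [dif_pos h1000]
        have er10d2 : PySem.Int.floordiv (i % 100) 10 = (i % 100) / 10 :=
          PySem.Int.floordiv_eq_ediv_of_pos (by norm_num)
        simp only [e100m, e10m, e100d, er10d2]
        by_cases hr0 : i % 100 = 0
        · rw [if_pos ⟨by omega, by omega, by omega, h1000⟩, if_neg (by omega), pvLenApp,
            pvLO _ (by omega) (by omega)]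
          have : PySem.Str.len "hundred" = 7 := by decide
          omega
        · have hc3 : ¬ (100 ≤ i ∧ (i % 100) / 10 = 0 ∧ i % 10 = 0 ∧ i < 1000) := by omega
          rw [if_neg hc3, if_pos hr0]
          by_cases hr20 : i % 100 < 20
          · rw [if_pos ⟨by omega, by omega, h1000⟩, pvLetters, if_pos (by omega : i % 100 < 20)]
            rw [pvLenApp, pvLenApp, pvLenApp, pvLO _ (by omega) (by omega),
              pvLO (i % 100) (by omega) (by omega)]
            have h7 : PySem.Str.len "hundred" = 7 := by decide
            have h3 : PySem.Str.len "and" = 3 := by decide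
            omega
          · rw [if_neg (by omega), if_pos ⟨by omega, h1000⟩, pvLetters,
              if_neg (by omega : ¬ i % 100 < 20), if_pos (by omega : i % 100 < 100)]
            have er2d : PySem.Int.floordiv (i % 100) 10 = (i % 100) / 10 :=
              PySem.Int.floordiv_eq_ediv_of_pos (by norm_num)
            have er2m : PySem.Int.mod (i % 100) 10 = (i % 100) % 10 :=
              PySem.Int.mod_eq_emod_of_pos (by norm_num)
            rw [er2d, er2m]
            have hmm : (i % 100) % 10 = i % 10 := by omega
            rw [hmm, pvLenApp, pvLenApp, pvLenApp, pvLenApp,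
              pvLO _ (by omega) (by omega), pvLT ((i % 100) / 10) (by omega) (by omega),
              pvLO (i % 10) (by omega) (by omega)]
            have h7 : PySem.Str.len "hundred" = 7 := by decide
            have h3 : PySem.Str.len "and" = 3 := by decide
            omega
      · rw [dif_neg h1000, if_neg (by omega), if_neg (by omega), if_neg (by omega)]
        by_cases hq : i = 1000
        · rw [if_pos hq, if_pos hq]; decide
        · rw [if_neg hq, if_neg hq]; decide

-- ===== VERDICT (by name: the statement is the Claim_ definition above) =====
theorem compute_spec : Claim_equal_compute := by
  intro START END _ hpre
  unfold Spec_compute compute compute_alt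
  rw [PySem.List.foldl_add]
  rcases hpre with hge | hlt
  · rw [zero_add]
    exact congrArg List.sum (List.map_congr_left (fun i hm => by
      have := (PySem.List.mem_pyRange_one.mp hm).1
      exact pvPointwise i (by omega)))
  · rw [PySem.List.pyRange_one_eq_nil (by omega)]
    simp
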